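-- pv_equiv track=rewrite | github.com/KUSH42/hermes-agent | agent/rich_output.py | _count_pass
-- ===== SOURCE A (Python) =====
-- from typing import Optional
--
-- def _parse_diff_filename(path: str, fallback: Optional[str] = None) -> str:
--     """Return a displayable path from a unified-diff path string.
--
--     Strips ``b/`` / ``a/`` prefixes produced by ``git diff``.  If the result
--     is ``/dev/null`` (deleted-file diff), recurses on *fallback* (the ``---``
--     path) instead.
--     """
--     for prefix in ("b/", "a/"):
--         if path.startswith(prefix):
--             path = path[len(prefix):]
--             break
--     if path == "/dev/null":
--         if fallback:
--             return _parse_diff_filename(fallback)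
--         return "?"
--     return path or "?"
--
-- def _count_pass(
--     lines: list[str],
--     explicit_filename: Optional[str] = None,
-- ) -> list[tuple[Optional[str], int, int]]:
--     """First pass over diff lines: build ``(filename, n_adds, n_dels)`` per file boundary.
--
--     When *explicit_filename* is provided (from ``from_content()``), the
--     filename is fixed and only one entry is produced.  Otherwise filenames are
--     parsed from ``+++ `` lines.
--     """
--     entries: list[tuple[Optional[str], int, int]] = []
--     current_file: Optional[str] = explicit_filename
--     n_adds = n_dels = 0
--     from_path: Optional[str] = None
--     started = explicit_filename is not None
--
--     for line in lines:
--         if line.startswith("--- "):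
--             from_path = line[4:].strip()
--         elif line.startswith("+++ "):
--             if started:
--                 entries.append((current_file, n_adds, n_dels))
--             to_path = line[4:].strip()
--             if explicit_filename is None:
--                 current_file = _parse_diff_filename(to_path, from_path)
--             n_adds = n_dels = 0
--             started = True
--         elif line.startswith("+"):
--             n_adds += 1
--         elif line.startswith("-"):
--             n_dels += 1
--
--     if started:
--         entries.append((current_file, n_adds, n_dels))
--
--     return entries
-- ===== SOURCE B (Python) =====
-- from typing import Optional
--
-- def _parse_diff_filename(path: str, fallback: Optional[str] = None) -> str:
--     for prefix in ("b/", "a/"):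
--         if path.startswith(prefix):
--             path = path[len(prefix):]
--             break
--     if path == "/dev/null":
--         if fallback:
--             return _parse_diff_filename(fallback)
--         return "?"
--     return path or "?"
--
-- def _chunks(lines):
--     """Split diff lines at '+++ ' boundaries: the lines before the first
--     boundary, and one (boundary_line, segment) per boundary."""
--     prefix, groups = [], []
--     for line in lines:
--         if line.startswith("+++ "):
--             groups.append((line, []))
--         elif groups:
--             groups[-1][1].append(line)
--         else:
--             prefix.append(line)
--     return prefix, groups
--
-- def _stats(seg):
--     adds = sum(1 for l in seg if l.startswith("+"))
--     dels = sum(1 for l in seg if l.startswith("-") and not l.startswith("--- "))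
--     return adds, dels
--
-- def _last_from(seg, default):
--     for l in reversed(seg):
--         if l.startswith("--- "):
--             return l[4:].strip()
--     return default
--
-- def _count_pass(lines, explicit_filename=None):
--     prefix, groups = _chunks(lines)
--     if explicit_filename is not None:
--         return [(explicit_filename,) + _stats(prefix)] + \
--                [(explicit_filename,) + _stats(seg) for _, seg in groups]
--     entries = []
--     from_path = _last_from(prefix, None)
--     for bline, seg in groups:
--         name = _parse_diff_filename(bline[4:].strip(), from_path)
--         entries.append((name,) + _stats(seg))
--         from_path = _last_from(seg, from_path)
--     return entries
-- ===== Notes on version B (the rewrite author's own statement) =====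
-- stated objective: alternative
-- what changed: Replaces A's single running-counter loop with flush-on-boundary state (entries/current_file/n_adds/n_dels/started) by a split-then-map decomposition: first split the lines into the pre-boundary prefix and one (boundary line, segment) chunk per '+++ ' line, then compute each entry's name and add/delete counts per chunk.
import Mathlib
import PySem

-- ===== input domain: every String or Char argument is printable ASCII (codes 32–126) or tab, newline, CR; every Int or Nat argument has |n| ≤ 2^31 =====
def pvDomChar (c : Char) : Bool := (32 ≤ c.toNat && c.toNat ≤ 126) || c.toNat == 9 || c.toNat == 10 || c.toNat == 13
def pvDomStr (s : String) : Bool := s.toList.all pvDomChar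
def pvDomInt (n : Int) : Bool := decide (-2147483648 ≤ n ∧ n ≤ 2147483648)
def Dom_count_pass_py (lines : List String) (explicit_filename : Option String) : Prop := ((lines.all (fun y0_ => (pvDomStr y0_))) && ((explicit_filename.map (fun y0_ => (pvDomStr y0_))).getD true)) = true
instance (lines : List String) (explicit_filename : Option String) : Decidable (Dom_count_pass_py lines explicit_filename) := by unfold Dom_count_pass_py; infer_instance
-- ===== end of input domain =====

-- B re-implements the running-counter flush loop as a split-into-chunks pass (split at '+++ '
-- boundaries, then map per-segment counts); alternative decomposition, same cost.

-- ===== PORT A =====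
-- line[4:].strip()
def pvStrip4 (line : String) : String := PySem.Str.strip (PySem.Str.slice line (some 4) none)

-- _parse_diff_filename with fallback = None (the recursive call's shape)
def pvParse1 (path : String) : String :=
  let path :=
    if PySem.Str.startswith path "b/" then PySem.Str.slice path (some 2) none
    else if PySem.Str.startswith path "a/" then PySem.Str.slice path (some 2) none
    else path
  if path = "/dev/null" then "?"
  else if path = "" then "?" else path

-- _parse_diff_filename (the recursion depth is at most one: the recursive call passes no fallback)
def pvParse (path : String) (fallback : Option String) : String :=
  let path :=
    if PySem.Str.startswith path "b/" then PySem.Str.slice path (some 2) none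
    else if PySem.Str.startswith path "a/" then PySem.Str.slice path (some 2) none
    else path
  if path = "/dev/null" then
    match fallback with
    | some f => if f ≠ "" then pvParse1 f else "?"
    | none => "?"
  else if path = "" then "?" else path

-- loop body of A: state = (entries, current_file, n_adds, n_dels, from_path, started)
def pvStepA (explicit : Option String)
    (st : List (Option String × Int × Int) × Option String × Int × Int × Option String × Bool)
    (line : String) :
    List (Option String × Int × Int) × Option String × Int × Int × Option String × Bool :=
  match st with
  | (entries, cf, a, d, fp, started) =>
    if PySem.Str.startswith line "--- " then (entries, cf, a, d, some (pvStrip4 line), started)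
    else if PySem.Str.startswith line "+++ " then
      let entries := if started then entries ++ [(cf, a, d)] else entries
      let to_path := pvStrip4 line
      let cf := if explicit.isNone then some (pvParse to_path fp) else cf
      (entries, cf, 0, 0, fp, true)
    else if PySem.Str.startswith line "+" then (entries, cf, a + 1, d, fp, started)
    else if PySem.Str.startswith line "-" then (entries, cf, a, d + 1, fp, started)
    else (entries, cf, a, d, fp, started)

-- final flush of A
def pvFinalA (st : List (Option String × Int × Int) × Option String × Int × Int × Option String × Bool) :
    List (Option String × Int × Int) :=
  match st with
  | (entries, cf, a, d, _, started) => if started then entries ++ [(cf, a, d)] else entries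

def count_pass_py (lines : List String) (explicit_filename : Option String) : List (Option String × Int × Int) :=
  pvFinalA (lines.foldl (pvStepA explicit_filename)
    ([], explicit_filename, 0, 0, none, explicit_filename.isSome))

-- ===== PORT B =====
-- loop body of _chunks: state = (prefix, finished groups, group under construction)
def pvChunkStep (st : List String × List (String × List String) × Option (String × List String))
    (line : String) : List String × List (String × List String) × Option (String × List String) :=
  match st with
  | (pre, done, cur) =>
    if PySem.Str.startswith line "+++ " then
      match cur with
      | some g => (pre, done ++ [g], some (line, []))
      | none => (pre, done, some (line, []))
    else
      match cur with
      | some (b, seg) => (pre, done, some (b, seg ++ [line]))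
      | none => (pre ++ [line], done, none)

def pvChunks (lines : List String) : List String × List (String × List String) :=
  match lines.foldl pvChunkStep ([], [], none) with
  | (pre, done, some g) => (pre, done ++ [g])
  | (pre, done, none) => (pre, done)

-- _stats
def pvAdds (seg : List String) : Int := ((seg.countP (fun l => PySem.Str.startswith l "+") : Nat) : Int)
def pvDels (seg : List String) : Int :=
  ((seg.countP (fun l => PySem.Str.startswith l "-" && !PySem.Str.startswith l "--- ") : Nat) : Int)

-- _last_from: last '--- ' payload of seg (scan in reverse, first hit), else default
def pvLastFrom (seg : List String) (default : Option String) : Option String :=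
  match seg.reverse.find? (fun l => PySem.Str.startswith l "--- ") with
  | some l => some (pvStrip4 l)
  | none => default

-- the explicit_filename-is-None loop of B
def pvGoNone : List (String × List String) → Option String → List (Option String × Int × Int)
  | [], _ => []
  | (b, seg) :: gs, fp =>
    (some (pvParse (pvStrip4 b) fp), pvAdds seg, pvDels seg) :: pvGoNone gs (pvLastFrom seg fp)

def count_pass_py_alt (lines : List String) (explicit_filename : Option String) : List (Option String × Int × Int) :=
  let pg := pvChunks lines
  match explicit_filename with
  | some e => (some e, pvAdds pg.1, pvDels pg.1) :: pg.2.map (fun g => (some e, pvAdds g.2, pvDels g.2))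
  | none => pvGoNone pg.2 (pvLastFrom pg.1 none)

-- ===== PRECONDITION & SPEC =====
def Spec_count_pass_py (lines : List String) (explicit_filename : Option String) (out : List (Option String × Int × Int)) : Prop := out = count_pass_py_alt lines explicit_filename
instance (lines : List String) (explicit_filename : Option String) (out : List (Option String × Int × Int)) : Decidable (Spec_count_pass_py lines explicit_filename out) := by unfold Spec_count_pass_py; infer_instance

-- ===== CLAIM (what is proved, stated in full; the proofs are below) =====
def Claim_equal_count_pass_py : Prop := ∀ (lines : List String) (explicit_filename : Option String), Dom_count_pass_py lines explicit_filename → Spec_count_pass_py lines explicit_filename (count_pass_py lines explicit_filename)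

-- ===== LEMMAS AND PROOFS =====

-- recursive characterisation of pvChunks
def chunksR : List String → List String × List (String × List String)
  | [] => ([], [])
  | l :: rest =>
    let pg := chunksR rest
    if PySem.Str.startswith l "+++ " then ([], (l, pg.1) :: pg.2) else (l :: pg.1, pg.2)

-- the filenames/counts A produces after the first boundary
def tailA (explicit : Option String) :
    List (String × List String) → Option String → Option String → List (Option String × Int × Int)
  | [], _, _ => []
  | (b, seg) :: gs, fp, cf =>
    let cf' := if explicit.isNone then some (pvParse (pvStrip4 b) fp) else cf
    (cf', pvAdds seg, pvDels seg) :: tailA explicit gs (pvLastFrom seg fp) cf'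

theorem startswith_head_ne {L p1 p2 : List Char} {c1 c2 : Char} (hne : c1 ≠ c2)
    (h1 : (c1 :: p1) <+: L) : ¬ ((c2 :: p2) <+: L) := by
  rintro ⟨u, hu⟩
  obtain ⟨t, ht⟩ := h1
  rw [← ht] at hu
  simp [List.cons_append] at hu
  exact hne hu.1.symm

theorem lastFrom_cons (l : String) (p : List String) (d : Option String) :
    pvLastFrom (l :: p) d
      = pvLastFrom p (if PySem.Str.startswith l "--- " then some (pvStrip4 l) else d) := by
  unfold pvLastFrom
  rw [List.reverse_cons, List.find?_append]
  cases h : p.reverse.find? (fun l => PySem.Str.startswith l "--- ") with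
  | some x => simp
  | none =>
    by_cases hl : PySem.Chars.startswith l.toList ['-','-','-',' '] = true <;>
      simp [hl]

-- finishing step of pvChunks (proof helper)
def pvChunksFin (st : List String × List (String × List String) × Option (String × List String)) :
    List String × List (String × List String) :=
  match st with
  | (pre, done, some g) => (pre, done ++ [g])
  | (pre, done, none) => (pre, done)

theorem chunks_go_some (rest : List String) :
    ∀ (pre : List String) (done : List (String × List String)) (b : String) (seg : List String),
      pvChunksFin (rest.foldl pvChunkStep (pre, done, some (b, seg)))
        = (pre, done ++ (b, seg ++ (chunksR rest).1) :: (chunksR rest).2) := by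
  induction rest with
  | nil => intro pre done b seg; simp [pvChunksFin, chunksR]
  | cons l rest ih =>
    intro pre done b seg
    by_cases h : PySem.Chars.startswith l.toList ['+','+','+',' '] = true
    · simp [List.foldl_cons, pvChunkStep, h, chunksR, ih]
    · simp [List.foldl_cons, pvChunkStep, h, chunksR, ih]

theorem chunks_go_none (rest : List String) :
    ∀ (pre : List String) (done : List (String × List String)),
      pvChunksFin (rest.foldl pvChunkStep (pre, done, none))
        = (pre ++ (chunksR rest).1, done ++ (chunksR rest).2) := by
  induction rest with
  | nil => intro pre done; simp [pvChunksFin, chunksR]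
  | cons l rest ih =>
    intro pre done
    by_cases h : PySem.Chars.startswith l.toList ['+','+','+',' '] = true
    · simp [List.foldl_cons, pvChunkStep, h, chunksR, chunks_go_some]
    · simp [List.foldl_cons, pvChunkStep, h, chunksR, ih]

theorem chunks_eq (lines : List String) : pvChunks lines = chunksR lines := by
  have h := chunks_go_none lines [] []
  simp [pvChunksFin] at h
  unfold pvChunks
  rcases hst : lines.foldl pvChunkStep ([], [], none) with ⟨pre, done, cur⟩
  rw [hst] at h
  cases cur <;> simp_all

-- prefix-head exclusivity facts
theorem sw_dash_not_plus {s : String} (h : PySem.Chars.startswith s.toList ['-','-','-',' '] = true) :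
    PySem.Chars.startswith s.toList ['+'] = false := by
  rw [Bool.eq_false_iff]
  intro h2
  rw [PySem.Chars.startswith_iff] at h h2
  exact startswith_head_ne (c1 := '-') (c2 := '+') (by decide) h h2

theorem sw_dash_not_pppl {s : String} (h : PySem.Chars.startswith s.toList ['-','-','-',' '] = true) :
    PySem.Chars.startswith s.toList ['+','+','+',' '] = false := by
  rw [Bool.eq_false_iff]
  intro h2
  rw [PySem.Chars.startswith_iff] at h h2
  exact startswith_head_ne (c1 := '-') (c2 := '+') (by decide) h h2

theorem sw_plus_not_minus {s : String} (h : PySem.Chars.startswith s.toList ['+'] = true) :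
    PySem.Chars.startswith s.toList ['-'] = false := by
  rw [Bool.eq_false_iff]
  intro h2
  rw [PySem.Chars.startswith_iff] at h h2
  exact startswith_head_ne (c1 := '+') (c2 := '-') (by decide) h h2

theorem adds_cons (l : String) (p : List String) :
    pvAdds (l :: p) = (if PySem.Str.startswith l "+" then 1 else 0) + pvAdds p := by
  unfold pvAdds
  rw [List.countP_cons]
  by_cases h : PySem.Chars.startswith l.toList ['+'] = true <;> simp [h]
  try omega

theorem dels_cons (l : String) (p : List String) :
    pvDels (l :: p)
      = (if PySem.Str.startswith l "-" && !PySem.Str.startswith l "--- " then 1 else 0) + pvDels p := by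
  unfold pvDels
  rw [List.countP_cons]
  by_cases h : (PySem.Chars.startswith l.toList ['-']
      && !PySem.Chars.startswith l.toList ['-','-','-',' ']) = true <;>
    simp [h]
  try omega

-- A's loop from a started state, described by chunksR + tailA
theorem stepA_started (explicit : Option String) (lines : List String) :
    ∀ (entries : List (Option String × Int × Int)) (cf : Option String) (a d : Int) (fp : Option String),
      pvFinalA (lines.foldl (pvStepA explicit) (entries, cf, a, d, fp, true))
        = entries ++ (cf, a + pvAdds (chunksR lines).1, d + pvDels (chunksR lines).1)
            :: tailA explicit (chunksR lines).2 (pvLastFrom (chunksR lines).1 fp) cf := by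
  induction lines with
  | nil =>
    intro entries cf a d fp
    simp [pvFinalA, chunksR, tailA, pvAdds, pvDels]
  | cons l rest ih =>
    intro entries cf a d fp
    by_cases h1 : PySem.Chars.startswith l.toList ['-','-','-',' '] = true
    · simp [List.foldl_cons, pvStepA, h1, chunksR, sw_dash_not_pppl h1, ih,
        adds_cons, dels_cons, sw_dash_not_plus h1, lastFrom_cons]
    · by_cases h2 : PySem.Chars.startswith l.toList ['+','+','+',' '] = true
      · simp [List.foldl_cons, pvStepA, h1, h2, chunksR, ih, tailA, pvAdds, pvDels,
          pvLastFrom]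
      · by_cases h3 : PySem.Chars.startswith l.toList ['+'] = true
        · simp [List.foldl_cons, pvStepA, h1, h2, h3, chunksR, ih, adds_cons, dels_cons,
            sw_plus_not_minus h3, lastFrom_cons]
          ring_nf
        · by_cases h4 : PySem.Chars.startswith l.toList ['-'] = true
          · simp [List.foldl_cons, pvStepA, h1, h2, h3, h4, chunksR, ih, adds_cons, dels_cons,
              lastFrom_cons]
            ring_nf
          · simp [List.foldl_cons, pvStepA, h1, h2, h3, h4, chunksR, ih, adds_cons, dels_cons,
              lastFrom_cons]

-- A's loop from a not-yet-started state
theorem stepA_unstarted (explicit : Option String) (lines : List String) :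
    ∀ (entries : List (Option String × Int × Int)) (cf : Option String) (a d : Int) (fp : Option String),
      pvFinalA (lines.foldl (pvStepA explicit) (entries, cf, a, d, fp, false))
        = entries ++ tailA explicit (chunksR lines).2 (pvLastFrom (chunksR lines).1 fp) cf := by
  induction lines with
  | nil => intro entries cf a d fp; simp [pvFinalA, chunksR, tailA]
  | cons l rest ih =>
    intro entries cf a d fp
    by_cases h1 : PySem.Chars.startswith l.toList ['-','-','-',' '] = true
    · simp [List.foldl_cons, pvStepA, h1, chunksR, sw_dash_not_pppl h1, ih, lastFrom_cons]
    · by_cases h2 : PySem.Chars.startswith l.toList ['+','+','+',' '] = true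
      · simp [List.foldl_cons, pvStepA, h1, h2, chunksR, stepA_started, tailA, pvLastFrom]
      · by_cases h3 : PySem.Chars.startswith l.toList ['+'] = true
        · simp [List.foldl_cons, pvStepA, h1, h2, h3, chunksR, ih, lastFrom_cons]
        · by_cases h4 : PySem.Chars.startswith l.toList ['-'] = true
          · simp [List.foldl_cons, pvStepA, h1, h2, h3, h4, chunksR, ih, lastFrom_cons]
          · simp [List.foldl_cons, pvStepA, h1, h2, h3, h4, chunksR, ih, lastFrom_cons]

theorem tailA_some (e : String) (gs : List (String × List String)) :
    ∀ fp, tailA (some e) gs fp (some e) = gs.map (fun g => (some e, pvAdds g.2, pvDels g.2)) := by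
  induction gs with
  | nil => intro fp; simp [tailA]
  | cons g gs ih => intro fp; cases g; simp [tailA, ih]

theorem tailA_none (gs : List (String × List String)) :
    ∀ fp cf, tailA none gs fp cf = pvGoNone gs fp := by
  induction gs with
  | nil => intro fp cf; simp [tailA, pvGoNone]
  | cons g gs ih => intro fp cf; cases g; simp [tailA, pvGoNone, ih]

-- ===== VERDICT (by name: the statement is the Claim_ definition above) =====
theorem count_pass_py_spec : Claim_equal_count_pass_py := by
  intro lines explicit _
  unfold Spec_count_pass_py count_pass_py count_pass_py_alt
  rw [chunks_eq]
  cases explicit with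
  | none => simp [stepA_unstarted, tailA_none]
  | some e => simp [stepA_started, tailA_some]
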